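-- pv_equiv track=rewrite | github.com/JosephLi2023/CS224R | src/envs/prompts/react_webshop.py | parse_react_action
-- ===== SOURCE A (Python) =====
-- def parse_react_action(generation: str) -> str:
--     """Extract the `Action: ...` line from a model generation.
--
--     Returns the action body (everything after `Action:` on the first matching
--     line). Falls back to the first non-empty line if no `Action:` prefix is
--     found, which makes the function robust to the policy's early-training
--     drift before it has internalized the ReAct format.
--     """
--     for raw in generation.splitlines():
--         line = raw.strip()
--         if not line:
--             continue
--         low = line.lower()
--         if low.startswith("action:"):
--             return line[len("action:") :].strip() or line
--     # Fallback: first non-empty line.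
--     for raw in generation.splitlines():
--         line = raw.strip()
--         if line:
--             return line
--     return ""
-- ===== SOURCE B (Python) =====
-- def parse_react_action(generation: str) -> str:
--     """Single pass: search for the Action line while caching the first
--     non-empty line as fallback, instead of two separate scans."""
--     fallback = None
--     for raw in generation.splitlines():
--         line = raw.strip()
--         if not line:
--             continue
--         if line.lower().startswith("action:"):
--             return line[len("action:"):].strip() or line
--         if fallback is None:
--             fallback = line
--     return fallback or ""
-- ===== Notes on version B (the rewrite author's own statement) =====
-- stated objective: simpler
-- what changed: Replaces A's two separate scans of splitlines (one for the Action line, a second whole rescan for the first non-empty fallback line) with one pass that searches and caches the fallback simultaneously.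
import Mathlib
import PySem

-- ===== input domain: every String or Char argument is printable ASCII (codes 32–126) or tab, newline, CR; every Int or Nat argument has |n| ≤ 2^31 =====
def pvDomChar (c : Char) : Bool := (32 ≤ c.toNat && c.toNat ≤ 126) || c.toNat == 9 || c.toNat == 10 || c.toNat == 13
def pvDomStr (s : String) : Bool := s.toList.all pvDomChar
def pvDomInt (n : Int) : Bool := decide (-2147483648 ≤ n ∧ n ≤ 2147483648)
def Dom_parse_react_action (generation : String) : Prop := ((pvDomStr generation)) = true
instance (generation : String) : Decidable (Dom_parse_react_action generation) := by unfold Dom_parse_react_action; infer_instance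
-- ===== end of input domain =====

-- B merges A's two scans of generation.splitlines() into a single pass that
-- caches the first non-empty line as fallback; objective: simpler.

-- ===== PORT A =====
-- first loop of A: return body of first "Action:" line, none if no such line
def pvLoopActionA : List String → Option String
  | [] => none
  | raw :: rest =>
    let line := PySem.Str.strip raw
    if line = "" then pvLoopActionA rest
    else
      if PySem.Str.startswith (PySem.Str.lower line) "action:" then
        some (let body := PySem.Str.strip (PySem.Str.slice line (some 7) none)
              if body = "" then line else body)
      else pvLoopActionA rest

-- second loop of A: first non-empty stripped line
def pvLoopFallbackA : List String → Option String
  | [] => none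
  | raw :: rest =>
    let line := PySem.Str.strip raw
    if line = "" then pvLoopFallbackA rest else some line

def parse_react_action (generation : String) : String :=
  match pvLoopActionA (PySem.Str.splitlines generation) with
  | some r => r
  | none =>
    match pvLoopFallbackA (PySem.Str.splitlines generation) with
    | some r => r
    | none => ""

-- ===== PORT B =====
-- single pass carrying the fallback (None until the first non-empty line)
def pvLoopB : List String → Option String → String
  | [], fb => match fb with
    | none => ""
    | some f => if f = "" then "" else f   -- `fallback or ""`
  | raw :: rest, fb =>
    let line := PySem.Str.strip raw
    if line = "" then pvLoopB rest fb
    else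
      if PySem.Str.startswith (PySem.Str.lower line) "action:" then
        let body := PySem.Str.strip (PySem.Str.slice line (some 7) none)
        if body = "" then line else body
      else
        match fb with
        | none => pvLoopB rest (some line)
        | some _ => pvLoopB rest fb

def parse_react_action_alt (generation : String) : String :=
  pvLoopB (PySem.Str.splitlines generation) none

-- ===== PRECONDITION & SPEC =====
def Spec_parse_react_action (generation : String) (out : String) : Prop := out = parse_react_action_alt generation
instance (generation : String) (out : String) : Decidable (Spec_parse_react_action generation out) := by unfold Spec_parse_react_action; infer_instance

-- ===== CLAIM (what is proved, stated in full; the proofs are below) =====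
def Claim_equal_parse_react_action : Prop := ∀ (generation : String), Dom_parse_react_action generation → Spec_parse_react_action generation (parse_react_action generation)

-- ===== LEMMAS AND PROOFS =====

-- with a non-empty fallback in hand, the single pass only still searches for the action line
theorem pvLoopB_some (lines : List String) (f : String) (hf : f ≠ "") :
    pvLoopB lines (some f) = match pvLoopActionA lines with | some r => r | none => f := by
  induction lines with
  | nil => simp [pvLoopB, pvLoopActionA, hf]
  | cons raw rest ih =>
    simp only [pvLoopB, pvLoopActionA]
    split_ifs with h1 h2 <;> simp [ih]

theorem pvLoopB_none (lines : List String) :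
    pvLoopB lines none =
      match pvLoopActionA lines with
      | some r => r
      | none => match pvLoopFallbackA lines with | some r => r | none => "" := by
  induction lines with
  | nil => simp [pvLoopB, pvLoopActionA, pvLoopFallbackA]
  | cons raw rest ih =>
    simp only [pvLoopB, pvLoopActionA, pvLoopFallbackA]
    split_ifs with h1 h2 h3
    · exact ih
    · simp
    · simp
    · rw [pvLoopB_some rest (PySem.Str.strip raw) h1]

-- ===== VERDICT (by name: the statement is the Claim_ definition above) =====
theorem parse_react_action_spec : Claim_equal_parse_react_action := by
  intro g _
  unfold Spec_parse_react_action parse_react_action parse_react_action_alt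
  rw [pvLoopB_none]
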